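-- pv_equiv track=rewrite | github.com/Shtechman/fair-cakecutting-with-real-land-value-data | utils/reports/report_preprocessor.py | reorder_results_per_measure
-- ===== SOURCE A (Python) =====
-- def reorder_results_per_measure(avg_results_per_method, value_type_key, measures_keys):
--     return {
--         measure: {
--             method: [
--                 avg_results_per_method[method][groupsize][value_type_key][measure]
--                 if avg_results_per_method[method][groupsize][value_type_key]
--                 else ""
--                 for groupsize in avg_results_per_method[method]
--             ]
--             for method in avg_results_per_method
--         }
--         for measure in measures_keys
--     }
-- ===== SOURCE B (Python) =====
-- def reorder_results_per_measure(avg_results_per_method, value_type_key, measures_keys):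
--     # Flat-table strategy: one composite-key table filled in a single
--     # method/groupsize pass, then reshaped into the nested output.
--     measures = list(dict.fromkeys(measures_keys))
--     if not measures:
--         return {}
--     methods = list(avg_results_per_method)
--     cells = {(measure, method): [] for measure in measures for method in methods}
--     for method, groups in avg_results_per_method.items():
--         for group_results in groups.values():
--             inner = group_results[value_type_key]
--             for measure in measures:
--                 cells[measure, method].append(inner[measure] if inner else "")
--     return {measure: {method: cells[measure, method] for method in methods}
--             for measure in measures}
-- ===== Notes on version B (the rewrite author's own statement) =====
-- stated objective: alternative
-- what changed: B replaces A's triple-nested measure-first comprehension (a fresh 3-level dict lookup per cell) by a flat-table algorithm: it dedups the measure keys, pre-builds one flat table keyed by (measure, method) tuples, fills it in a single pass over methods/groupsizes resolving each inner value-type dict once, and finally reshapes the flat table into the nested output.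
import Mathlib
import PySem

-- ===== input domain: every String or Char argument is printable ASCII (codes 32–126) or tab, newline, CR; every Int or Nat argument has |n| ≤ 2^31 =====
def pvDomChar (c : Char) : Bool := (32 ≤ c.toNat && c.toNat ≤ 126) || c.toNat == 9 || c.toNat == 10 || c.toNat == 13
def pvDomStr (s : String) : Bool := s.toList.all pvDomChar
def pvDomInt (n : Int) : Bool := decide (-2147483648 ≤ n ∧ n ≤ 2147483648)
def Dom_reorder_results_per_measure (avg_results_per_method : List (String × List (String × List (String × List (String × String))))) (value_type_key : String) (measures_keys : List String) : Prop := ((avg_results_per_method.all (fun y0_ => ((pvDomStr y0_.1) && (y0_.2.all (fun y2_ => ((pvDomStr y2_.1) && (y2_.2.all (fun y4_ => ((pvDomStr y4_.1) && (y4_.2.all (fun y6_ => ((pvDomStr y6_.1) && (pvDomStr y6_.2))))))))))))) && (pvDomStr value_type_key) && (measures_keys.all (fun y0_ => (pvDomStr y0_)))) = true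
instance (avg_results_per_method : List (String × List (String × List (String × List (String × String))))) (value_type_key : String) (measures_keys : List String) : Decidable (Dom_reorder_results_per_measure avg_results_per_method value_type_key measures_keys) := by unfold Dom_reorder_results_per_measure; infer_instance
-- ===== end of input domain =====

-- B replaces the triple-nested measure-first comprehension by a flat table keyed by
-- (measure, method) tuples, filled in one method/groupsize pass and reshaped at the end.

-- ===== PORT A =====
-- One nested dict comprehension: for each measure, for each method (dict keys, looked up again),
-- for each groupsize (keys of avg[method], looked up again), take avg[m][g][vtk][measure] or "".
-- Python's failing `[k]` lookups (KeyError) are getD defaults here; Pre_ excludes those inputs.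
def reorder_results_per_measure (avg_results_per_method : List (String × List (String × List (String × List (String × String))))) (value_type_key : String) (measures_keys : List String) : List (String × List (String × List String)) :=
  (measures_keys.foldl (fun acc measure =>
      acc.insert measure
        (((avg_results_per_method.map (fun r => r.1)).foldl (fun acc2 method =>
            acc2.insert method
              ((((PySem.Dict.mk avg_results_per_method).getD method []).map (fun r => r.1)).map (fun groupsize =>
                if ((PySem.Dict.mk ((PySem.Dict.mk ((PySem.Dict.mk avg_results_per_method).getD method [])).getD groupsize [])).getD value_type_key []).isEmpty then ""
                else (PySem.Dict.mk ((PySem.Dict.mk ((PySem.Dict.mk ((PySem.Dict.mk avg_results_per_method).getD method [])).getD groupsize [])).getD value_type_key [])).getD measure ""))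
          ) (PySem.Dict.empty : PySem.Dict String (List String))).items)
    ) (PySem.Dict.empty : PySem.Dict String (List (String × List String)))).items

-- ===== PORT B =====
-- measures = list(dict.fromkeys(measures_keys)) is PySem.List.dedup; cells is the flat table
-- keyed by (measure, method) tuples; one fill pass over methods/groupsizes resolving the inner
-- value-type dict once; the final two comprehensions reshape the flat table into nested dicts.
def reorder_results_per_measure_alt (avg_results_per_method : List (String × List (String × List (String × List (String × String))))) (value_type_key : String) (measures_keys : List String) : List (String × List (String × List String)) :=
  let measures := PySem.List.dedup measures_keys
  if measures.isEmpty then [] else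
  let methods := avg_results_per_method.map (fun r => r.1)
  let cells0 : PySem.Dict (String × String) (List String) :=
    measures.foldl (fun d measure => methods.foldl (fun d method => d.insert (measure, method) []) d) PySem.Dict.empty
  let cells := avg_results_per_method.foldl (fun d p =>
      p.2.foldl (fun d q =>
        let inner := (PySem.Dict.mk q.2).getD value_type_key []
        measures.foldl (fun d measure =>
          d.modify (measure, p.1) [] (fun l => l ++ [if inner.isEmpty then "" else (PySem.Dict.mk inner).getD measure ""])) d) d) cells0
  measures.map (fun measure => (measure, methods.map (fun method => (method, cells.getD (measure, method) []))))

-- ===== PRECONDITION & SPEC =====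
-- Pre_ excludes (when measures_keys is nonempty, the only case where A evaluates anything):
-- (a) duplicate method or groupsize keys — such association lists do not arise from a Python
--     dict, whose keys are unique, so any behaviour on them is an artefact of the encoding;
-- (b) inputs on which A raises KeyError: a groupsize dict missing value_type_key, or a
--     nonempty inner dict missing one of measures_keys (B raises KeyError there as well).
def Pre_reorder_results_per_measure (avg_results_per_method : List (String × List (String × List (String × List (String × String))))) (value_type_key : String) (measures_keys : List String) : Prop :=
  measures_keys ≠ [] →
    ((avg_results_per_method.map (fun r => r.1)).Nodup ∧
     ∀ p ∈ avg_results_per_method,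
       (p.2.map (fun r => r.1)).Nodup ∧
       ∀ q ∈ p.2,
         value_type_key ∈ q.2.map (fun r => r.1) ∧
         ((PySem.Dict.mk q.2).getD value_type_key [] ≠ [] →
           ∀ measure ∈ measures_keys,
             measure ∈ ((PySem.Dict.mk q.2).getD value_type_key []).map (fun r => r.1)))
instance (avg_results_per_method : List (String × List (String × List (String × List (String × String))))) (value_type_key : String) (measures_keys : List String) : Decidable (Pre_reorder_results_per_measure avg_results_per_method value_type_key measures_keys) := by unfold Pre_reorder_results_per_measure; infer_instance

def pvWitness_reorder_results_per_measure : (List (String × List (String × List (String × List (String × String))))) × String × List String :=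
  ([("Method1", [("2", [("abs", [("egal", "0.9"), ("util", "1.2")])]),
                 ("4", [("abs", [])])]),
    ("Method2", [("2", [("abs", [("egal", "0.7"), ("util", "1.0")])])])],
   "abs", ["egal", "util"])

def Spec_reorder_results_per_measure (avg_results_per_method : List (String × List (String × List (String × List (String × String))))) (value_type_key : String) (measures_keys : List String) (out : List (String × List (String × List String))) : Prop := out = reorder_results_per_measure_alt avg_results_per_method value_type_key measures_keys
instance (avg_results_per_method : List (String × List (String × List (String × List (String × String))))) (value_type_key : String) (measures_keys : List String) (out : List (String × List (String × List String))) : Decidable (Spec_reorder_results_per_measure avg_results_per_method value_type_key measures_keys out) := by unfold Spec_reorder_results_per_measure; infer_instance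

-- ===== CLAIM (what is proved, stated in full; the proofs are below) =====
def Claim_equal_reorder_results_per_measure : Prop := ∀ (avg_results_per_method : List (String × List (String × List (String × List (String × String))))) (value_type_key : String) (measures_keys : List String), Dom_reorder_results_per_measure avg_results_per_method value_type_key measures_keys → Pre_reorder_results_per_measure avg_results_per_method value_type_key measures_keys → Spec_reorder_results_per_measure avg_results_per_method value_type_key measures_keys (reorder_results_per_measure avg_results_per_method value_type_key measures_keys)

-- ===== LEMMAS AND PROOFS =====

-- The cell both programs compute for a fixed groupsize dict and measure.
def pvCell (value_type_key measure : String) (gd : List (String × List (String × String))) : String :=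
  if ((PySem.Dict.mk gd).getD value_type_key []).isEmpty then ""
  else (PySem.Dict.mk ((PySem.Dict.mk gd).getD value_type_key [])).getD measure ""

def pvRow (value_type_key measure : String) (g : List (String × List (String × List (String × String)))) : List String :=
  g.map (fun q => pvCell value_type_key measure q.2)

-- the common normal form both ports are reduced to
def pvExpected (avg_results_per_method : List (String × List (String × List (String × List (String × String))))) (value_type_key : String) (measures_keys : List String) : List (String × List (String × List String)) :=
  (PySem.List.dedup measures_keys).map (fun measure =>
    (measure, avg_results_per_method.map (fun p => (p.1, pvRow value_type_key measure p.2))))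

theorem pv_ofList_nodup (xs : List String) (h : xs.Nodup) : PySem.Set.ofList xs = xs := by
  have := PySem.Set.update_eq_append_of_disjoint ([] : PySem.Set String) xs h
    (by intro x _ hx; simp at hx)
  simpa [PySem.Set.update, PySem.Set.ofList, PySem.Set.empty] using this

theorem pv_update_nil_eq_ofList (xs : List String) : PySem.Set.update ([] : PySem.Set String) xs = PySem.Set.ofList xs := rfl

-- a fold of inserts whose value depends only on the key, starting from a dict in the same shape
theorem pv_items_foldl_insert_const {ν : Type} (v : String → ν) :
    ∀ (ms l : List String), l.Nodup →
      ((ms.foldl (fun d μ => d.insert μ (v μ))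
          (PySem.Dict.mk (l.map (fun μ => (μ, v μ))))).items)
        = (PySem.Set.update l ms).map (fun μ => (μ, v μ))
  | [], l, _ => by simp [PySem.Set.update_nil]
  | μ :: ms, l, hl => by
    rw [List.foldl_cons, PySem.Set.update_cons]
    by_cases hmem : μ ∈ l
    · have hc : (PySem.Dict.mk (l.map (fun a => (a, v a)))).contains μ = true :=
        (PySem.Dict.contains_iff_mem_keys _ _).mpr
          (by simp only [PySem.Dict.keys_mk, List.map_map]; simpa [Function.comp] using hmem)
      have heq : (PySem.Dict.mk (l.map (fun a => (a, v a)))).insert μ (v μ)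
          = PySem.Dict.mk (l.map (fun a => (a, v a))) := by
        apply PySem.Dict.ext
        rw [PySem.Dict.items_insert_of_contains _ _ hc]
        show (l.map (fun a => (a, v a))).map _ = _
        rw [List.map_map]
        apply List.map_congr_left
        intro a _
        by_cases h : a = μ <;> simp [h]
      have hadd : PySem.Set.add l μ = l := by
        simp [PySem.Set.add, hmem]
      rw [heq, hadd]
      exact pv_items_foldl_insert_const v ms l hl
    · have hc : (PySem.Dict.mk (l.map (fun a => (a, v a)))).contains μ = false := by
        refine Bool.eq_false_iff.mpr (fun hc => hmem ?_)
        have := (PySem.Dict.contains_iff_mem_keys _ _).mp hc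
        simp only [PySem.Dict.keys_mk, List.map_map] at this
        simpa [Function.comp] using this
      have heq : (PySem.Dict.mk (l.map (fun a => (a, v a)))).insert μ (v μ)
          = PySem.Dict.mk ((l ++ [μ]).map (fun a => (a, v a))) := by
        apply PySem.Dict.ext
        rw [PySem.Dict.items_insert_of_not_contains _ _ hc]
        simp
      have hadd : PySem.Set.add l μ = l ++ [μ] := by
        simp [PySem.Set.add, hmem]
      rw [heq, hadd]
      exact pv_items_foldl_insert_const v ms (l ++ [μ])
        (by rw [List.nodup_append]; exact ⟨hl, List.nodup_singleton μ, by intro a ha b hb; have hb' : b = μ := List.mem_singleton.mp hb; subst hb'; exact fun h => hmem (h ▸ ha)⟩)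

theorem pv_A_eq (avg : List (String × List (String × List (String × List (String × String))))) (vtk : String) (ms : List String)
    (hm : (avg.map (fun r => r.1)).Nodup)
    (hg : ∀ p ∈ avg, (p.2.map (fun r => r.1)).Nodup) :
    reorder_results_per_measure avg vtk ms = pvExpected avg vtk ms := by
  unfold reorder_results_per_measure pvExpected
  refine Eq.trans (pv_items_foldl_insert_const _ ms [] List.nodup_nil) ?_
  rw [pv_update_nil_eq_ofList, PySem.List.dedup_eq_ofList]
  apply List.map_congr_left
  intro μ _
  refine congrArg (Prod.mk μ) ?_
  refine Eq.trans (pv_items_foldl_insert_const _ (avg.map (fun r => r.1)) [] List.nodup_nil) ?_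
  rw [pv_update_nil_eq_ofList, pv_ofList_nodup _ hm, List.map_map]
  apply List.map_congr_left
  intro p hp
  simp only [Function.comp]
  have hget : (PySem.Dict.mk avg).getD p.1 [] = p.2 :=
    PySem.Dict.getD_of_mem_items _ (by simpa using hp) (by simpa [PySem.Dict.keys_mk] using hm) []
  refine congrArg (Prod.mk p.1) ?_
  rw [hget, List.map_map, pvRow]
  apply List.map_congr_left
  intro q hq
  simp only [Function.comp]
  have hq2 : (PySem.Dict.mk p.2).getD q.1 [] = q.2 :=
    PySem.Dict.getD_of_mem_items _ (by simpa using hq) (by simpa [PySem.Dict.keys_mk] using hg p hp) []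
  rw [hq2, pvCell]

-- B, part 1: the initialised flat table reads [] at every key (it only ever inserts []).
theorem pv_cells0_getD (l : List String) (meths : List String) :
    ∀ (d : PySem.Dict (String × String) (List String)),
      (∀ x, d.getD x [] = []) →
      ∀ x, (l.foldl (fun d measure => meths.foldl (fun d method => d.insert (measure, method) []) d) d).getD x [] = [] := by
  induction l with
  | nil => intro d hd x; exact hd x
  | cons m l ih =>
    intro d hd x
    rw [List.foldl_cons]
    refine ih _ (fun y => ?_) x
    clear ih x
    induction meths generalizing d with
    | nil => exact hd y
    | cons k ks ihk =>
      rw [List.foldl_cons]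
      refine ihk _ (fun z => ?_)
      rw [PySem.Dict.getD_insert]
      split_ifs with h
      · rfl
      · exact hd z

-- B, part 2: the innermost fold over (deduped, hence Nodup) measures, pointwise on getD.
theorem pv_fill_measures (k : String) (c : String → String) :
    ∀ (ms : List String), ms.Nodup →
    ∀ (d : PySem.Dict (String × String) (List String)) (μ meth : String),
      (ms.foldl (fun d measure => d.modify (measure, k) [] (fun l => l ++ [c measure])) d).getD (μ, meth) []
        = if meth = k ∧ μ ∈ ms then d.getD (μ, meth) [] ++ [c μ] else d.getD (μ, meth) []
  | [], _, d, μ, meth => by simp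
  | m :: ms, hnd, d, μ, meth => by
    rw [List.foldl_cons, pv_fill_measures k c ms hnd.of_cons]
    have hmod : (d.modify (m, k) [] (fun l => l ++ [c m])).getD (μ, meth) []
        = if (μ, meth) = (m, k) then d.getD (m, k) [] ++ [c m] else d.getD (μ, meth) [] := by
      rw [PySem.Dict.getD_modify]
    by_cases hk : meth = k
    · by_cases hμ : μ = m
      · have hnm : m ∉ ms := (List.nodup_cons.mp hnd).1
        rw [hmod]
        simp [hk, hμ, hnm]
      · rw [hmod]
        have hne : ¬ ((μ, meth) = (m, k)) := fun h => hμ (congrArg Prod.fst h)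
        by_cases hms : μ ∈ ms <;> simp [hk, hμ, hms]
    · rw [hmod]
      have hne : ¬ ((μ, meth) = (m, k)) := fun h => hk (congrArg Prod.snd h)
      simp [hk, hne]

-- B, part 3: the fold over one method's groupsizes appends that method's whole row.
theorem pv_fill_groups (vtk k : String) (ms : List String) (hnd : ms.Nodup) :
    ∀ (g : List (String × List (String × List (String × String)))) (d : PySem.Dict (String × String) (List String)) (μ meth : String),
      (g.foldl (fun d q =>
          ms.foldl (fun d measure =>
            d.modify (measure, k) [] (fun l => l ++ [if ((PySem.Dict.mk q.2).getD vtk []).isEmpty then "" else (PySem.Dict.mk ((PySem.Dict.mk q.2).getD vtk [])).getD measure ""])) d) d).getD (μ, meth) []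
        = if meth = k ∧ μ ∈ ms then d.getD (μ, meth) [] ++ pvRow vtk μ g else d.getD (μ, meth) []
  | [], d, μ, meth => by simp [pvRow]
  | q :: g, d, μ, meth => by
    rw [List.foldl_cons, pv_fill_groups vtk k ms hnd g, pv_fill_measures k _ ms hnd]
    by_cases h : meth = k ∧ μ ∈ ms
    · simp [h, pvRow, pvCell]
    · simp [h]

-- B, part 4: the outer fold over methods, via a filter characterisation (no Nodup needed here).
theorem pv_fill_avg (vtk : String) (ms : List String) (hnd : ms.Nodup) :
    ∀ (avg : List (String × List (String × List (String × List (String × String))))) (d : PySem.Dict (String × String) (List String)) (μ meth : String),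
      (avg.foldl (fun d p =>
          p.2.foldl (fun d q =>
            ms.foldl (fun d measure =>
              d.modify (measure, p.1) [] (fun l => l ++ [if ((PySem.Dict.mk q.2).getD vtk []).isEmpty then "" else (PySem.Dict.mk ((PySem.Dict.mk q.2).getD vtk [])).getD measure ""])) d) d) d).getD (μ, meth) []
        = if μ ∈ ms then d.getD (μ, meth) [] ++ (avg.filter (fun p => p.1 = meth)).flatMap (fun p => pvRow vtk μ p.2)
          else d.getD (μ, meth) []
  | [], d, μ, meth => by by_cases h : μ ∈ ms <;> simp [h]
  | p :: avg, d, μ, meth => by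
    rw [List.foldl_cons, pv_fill_avg vtk ms hnd avg, pv_fill_groups vtk p.1 ms hnd]
    by_cases hμ : μ ∈ ms
    · rw [List.filter_cons]
      by_cases hk : p.1 = meth
      · simp [hμ, hk, List.append_assoc]
      · have hne : ¬ (meth = p.1) := fun h => hk h.symm
        simp [hμ, hk, hne]
    · simp [hμ]

-- with Nodup method keys, the filter keeps exactly the one entry of a member.
theorem pv_filter_fst_nodup (avg : List (String × List (String × List (String × List (String × String)))))
    (hm : (avg.map (fun r => r.1)).Nodup) (p : String × List (String × List (String × List (String × String)))) (hp : p ∈ avg) :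
    avg.filter (fun r => r.1 = p.1) = [p] := by
  induction avg with
  | nil => cases hp
  | cons a avg ih =>
    rw [List.map_cons, List.nodup_cons] at hm
    by_cases hap : a = p
    · subst hap
      have hnil : avg.filter (fun r => r.1 = a.1) = [] := by
        rw [List.filter_eq_nil_iff]
        intro r hr
        simp only [decide_eq_true_eq]
        exact fun he => hm.1 (List.mem_map.mpr ⟨r, hr, he⟩)
      simp [hnil]
    · have hmem : p ∈ avg := (List.mem_cons.mp hp).resolve_left (fun h => hap h.symm)
      have hne : ¬ (a.1 = p.1) := fun he => hm.1 (List.mem_map.mpr ⟨p, hmem, he.symm⟩)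
      simp [hne, ih hm.2 hmem]

theorem pv_B_eq (avg : List (String × List (String × List (String × List (String × String))))) (vtk : String) (ms : List String)
    (hm : (avg.map (fun r => r.1)).Nodup) :
    reorder_results_per_measure_alt avg vtk ms = pvExpected avg vtk ms := by
  simp only [reorder_results_per_measure_alt]
  unfold pvExpected
  by_cases hd : PySem.List.dedup ms = []
  · simp only [PySem.List.dedup_eq_ofList] at hd
    simp [hd]
  · rw [if_neg (by simpa [List.isEmpty_iff] using hd)]
    apply List.map_congr_left
    intro μ hμ
    refine congrArg (Prod.mk μ) ?_
    rw [List.map_map]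
    apply List.map_congr_left
    intro p hp
    simp only [Function.comp]
    refine congrArg (Prod.mk p.1) ?_
    rw [pv_fill_avg vtk (PySem.List.dedup ms) (PySem.List.nodup_dedup ms) avg _ μ p.1]
    rw [if_pos hμ]
    rw [pv_cells0_getD (PySem.List.dedup ms) (avg.map (fun r => r.1)) PySem.Dict.empty
      (fun x => PySem.Dict.getD_empty x []) (μ, p.1)]
    rw [pv_filter_fst_nodup avg hm p hp]
    simp

-- ===== VERDICT (by name: the statement is the Claim_ definition above) =====
theorem reorder_results_per_measure_spec : Claim_equal_reorder_results_per_measure := by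
  intro avg vtk ms _hdom hpre
  unfold Spec_reorder_results_per_measure
  by_cases hms : ms = []
  · subst hms; rfl
  · obtain ⟨hm, hrest⟩ := hpre hms
    rw [pv_A_eq avg vtk ms hm (fun p hp => (hrest p hp).1), pv_B_eq avg vtk ms hm]
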